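-- pv_equiv track=rewrite | github.com/akhromovRT/pass24-servicedesk | backend/scripts/reformat_articles.py | remove_duplicate_h1
-- ===== SOURCE A (Python) =====
-- def remove_duplicate_h1(content: str) -> str:
--     """Удаляет первый H1 если он в самом начале (дублирует title)."""
--     lines = content.split("\n")
--     # Пропускаем ведущие пустые строки
--     idx = 0
--     while idx < len(lines) and not lines[idx].strip():
--         idx += 1
--     if idx < len(lines) and lines[idx].startswith("# "):
--         # Убираем H1 и последующие пустые строки
--         idx += 1
--         while idx < len(lines) and not lines[idx].strip():
--             idx += 1
--         return "\n".join(lines[idx:])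
--     return content
-- ===== SOURCE B (Python) =====
-- # Different algorithm: instead of splitting into a list of lines, skipping by
-- # index and re-joining, scan the string once with indices and return a single
-- # tail slice of the original string (no line list, no join).
--
-- _BLANK = " \t\r"
--
--
-- def _skip_blank_lines(content, i):
--     """Index of the start of the first line at/after i that is not
--     whitespace-only, or of the trailing whitespace-only tail (no newline)."""
--     n = len(content)
--     while True:
--         j = i
--         while j < n and content[j] in _BLANK:
--             j += 1
--         if j < n and content[j] == "\n":
--             i = j + 1
--         else:
--             return i
--
--
-- def remove_duplicate_h1(content: str) -> str:
--     i = _skip_blank_lines(content, 0)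
--     if not content.startswith("# ", i):
--         return content
--     k = content.find("\n", i)
--     if k == -1:
--         return ""
--     rest = content[_skip_blank_lines(content, k + 1):]
--     if not rest.lstrip(_BLANK):
--         return ""
--     return rest
-- ===== Notes on version B (the rewrite author's own statement) =====
-- stated objective: alternative
-- what changed: Instead of splitting the content into a list of lines, skipping blank lines by index and re-joining the tail, B scans the string once with character indices (skip blank lines, check '# ', find the newline, skip blank lines again) and returns a single tail slice of the original string, never building a line list or joining.
import Mathlib
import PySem

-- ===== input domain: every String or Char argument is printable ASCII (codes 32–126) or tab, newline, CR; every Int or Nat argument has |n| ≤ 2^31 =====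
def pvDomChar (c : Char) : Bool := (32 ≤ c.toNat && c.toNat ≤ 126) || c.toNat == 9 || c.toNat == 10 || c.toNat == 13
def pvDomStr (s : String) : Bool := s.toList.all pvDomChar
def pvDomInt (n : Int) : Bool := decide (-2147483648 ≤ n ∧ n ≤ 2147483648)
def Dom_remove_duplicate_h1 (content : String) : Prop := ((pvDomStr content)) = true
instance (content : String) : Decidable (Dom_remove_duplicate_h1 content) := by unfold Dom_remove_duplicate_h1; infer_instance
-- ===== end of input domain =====

-- B replaces A's split-into-lines / index-skip / re-join with a single scan that returns one tail suffix of the input (alternative decomposition).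

-- ===== PORT A =====
-- `while idx < len(lines) and not lines[idx].strip(): idx += 1` (loop state = idx)
def pvSkipIdx (lines : List (List Char)) (idx : Nat) : Nat :=
  if h : idx < lines.length ∧ PySem.Chars.strip (lines.getD idx []) = [] then
    pvSkipIdx lines (idx + 1)
  else idx
termination_by lines.length - idx
decreasing_by omega

def remove_duplicate_h1 (content : String) : String :=
  let lines := PySem.Chars.splitOn content.toList ['\n']   -- content.split("\n")
  let idx := pvSkipIdx lines 0
  if idx < lines.length && PySem.Chars.startswith (lines.getD idx []) ['#', ' '] then
    let idx2 := pvSkipIdx lines (idx + 1)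
    String.ofList (PySem.Chars.join ['\n'] (lines.drop idx2))   -- "\n".join(lines[idx:])
  else content

-- ===== PORT B =====
-- `c in " \t\r"` of Source B
def pvBlank (c : Char) : Bool := c == ' ' || c == '\t' || c == '\r'

-- Source B's `_skip_blank_lines(content, i)`: the index state i is represented by the
-- suffix content[i:]; the inner `while j < n and content[j] in _BLANK` loop is
-- dropWhile pvBlank, and `j < n and content[j] == "\n"` is the headD test (the
-- default ' ' only encodes "no character left", on which the test is false).
def pvSkipBlankLines (s : List Char) : List Char :=
  if h : ((s.dropWhile pvBlank).headD ' ') = '\n' then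
    pvSkipBlankLines (s.dropWhile pvBlank).tail
  else s
termination_by s.length
decreasing_by
  have h1 := List.length_dropWhile_le pvBlank s
  have h2 : s.dropWhile pvBlank ≠ [] := by
    intro hnil; rw [hnil] at h; exact absurd h (by decide)
  have h3 : 0 < (s.dropWhile pvBlank).length := List.length_pos_iff.mpr h2
  simp only [List.length_tail]; omega

def remove_duplicate_h1_alt (content : String) : String :=
  let s := pvSkipBlankLines content.toList                 -- i = _skip_blank_lines(content, 0); suffix form
  if PySem.Chars.startswith s ['#', ' '] then              -- content.startswith("# ", i)
    match s.dropWhile (· != '\n') with                     -- k = content.find("\n", i)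
    | [] => ""                                             -- k == -1
    | _ :: tl =>
      let rest := pvSkipBlankLines tl                      -- rest = content[_skip_blank_lines(content, k+1):]
      if rest.dropWhile pvBlank = [] then ""               -- not rest.lstrip(_BLANK)
      else String.ofList rest
  else content

-- ===== PRECONDITION & SPEC =====
def Spec_remove_duplicate_h1 (content : String) (out : String) : Prop := out = remove_duplicate_h1_alt content
instance (content : String) (out : String) : Decidable (Spec_remove_duplicate_h1 content out) := by unfold Spec_remove_duplicate_h1; infer_instance

-- ===== CLAIM (what is proved, stated in full; the proofs are below) =====
def Claim_equal_remove_duplicate_h1 : Prop := ∀ (content : String), Dom_remove_duplicate_h1 content → Spec_remove_duplicate_h1 content (remove_duplicate_h1 content)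

-- ===== LEMMAS AND PROOFS =====

-- fuel-free reformulation of PySem.Chars.splitOn on the separator "\n"
def pvClean : List Char → List Char → List (List Char)
  | [], cur => [cur.reverse]
  | c :: rest, cur => if c = '\n' then cur.reverse :: pvClean rest [] else pvClean rest (c :: cur)

-- the body of B's then-branch, as a List Char value (used to state the lemmas)
def pvThenB (cs : List Char) : List Char :=
  match (pvSkipBlankLines cs).dropWhile (· != '\n') with
  | [] => []
  | _ :: tl =>
    let rest := pvSkipBlankLines tl
    if rest.dropWhile pvBlank = [] then [] else rest

theorem pvClean_ne_nil (l cur : List Char) : pvClean l cur ≠ [] := by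
  induction l generalizing cur with
  | nil => simp [pvClean]
  | cons c rest ih => simp only [pvClean]; split_ifs <;> simp [ih]

theorem pvGo_eq_clean (fuel : Nat) (l cur : List Char) (acc : List (List Char))
    (hf : l.length < fuel) :
    PySem.Chars.splitOn.go ['\n'] fuel l cur acc = acc.reverse ++ pvClean l cur := by
  induction fuel generalizing l cur acc with
  | zero => omega
  | succ fuel ih =>
    cases l with
    | nil => simp [PySem.Chars.splitOn.go, pvClean]
    | cons c rest =>
      rw [PySem.Chars.splitOn.go]
      by_cases hc : c = '\n'
      · subst hc
        rw [if_pos (by simp [List.isPrefixOf])]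
        simp only [List.length_cons] at hf
        rw [ih _ _ _ (by simpa using Nat.lt_of_succ_lt_succ hf)]
        simp [pvClean]
      · rw [if_neg (by simp [List.isPrefixOf, Ne.symm hc])]
        simp only [List.length_cons] at hf
        rw [ih _ _ _ (by omega)]
        simp [pvClean, hc]

theorem pvSplitOn_eq_clean (cs : List Char) :
    PySem.Chars.splitOn cs ['\n'] = pvClean cs [] := by
  unfold PySem.Chars.splitOn
  exact pvGo_eq_clean _ _ _ _ (by omega)

theorem pvClean_no_nl (l cur : List Char) (h : '\n' ∉ l) : pvClean l cur = [cur.reverse ++ l] := by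
  induction l generalizing cur with
  | nil => simp [pvClean]
  | cons c rest ih =>
    simp only [pvClean]
    rw [if_neg (by intro hc; exact h (hc ▸ List.mem_cons_self))]
    rw [ih _ (fun hm => h (List.mem_cons_of_mem _ hm))]
    simp

theorem pvClean_split (l rest cur : List Char) (h : '\n' ∉ l) :
    pvClean (l ++ '\n' :: rest) cur = (cur.reverse ++ l) :: pvClean rest [] := by
  induction l generalizing cur with
  | nil => simp [pvClean]
  | cons c l' ih =>
    simp only [List.cons_append, pvClean]
    rw [if_neg (by intro hc; exact h (hc ▸ List.mem_cons_self))]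
    rw [ih _ (fun hm => h (List.mem_cons_of_mem _ hm))]
    simp

theorem pvClean_no_nl0 (l : List Char) (h : '\n' ∉ l) : pvClean l [] = [l] := by
  rw [pvClean_no_nl l [] h]; simp

theorem pvClean_split0 (l rest : List Char) (h : '\n' ∉ l) :
    pvClean (l ++ '\n' :: rest) [] = l :: pvClean rest [] := by
  rw [pvClean_split l rest [] h]; simp

theorem pvJoin_clean (l cur : List Char) :
    PySem.Chars.join ['\n'] (pvClean l cur) = cur.reverse ++ l := by
  induction l generalizing cur with
  | nil => simp [pvClean, PySem.Chars.join_singleton]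
  | cons c rest ih =>
    simp only [pvClean]
    split_ifs with hc
    · subst hc
      obtain ⟨p, ps, hps⟩ : ∃ p ps, pvClean rest [] = p :: ps := by
        cases hpc : pvClean rest [] with
        | nil => exact absurd hpc (pvClean_ne_nil _ _)
        | cons p ps => exact ⟨p, ps, rfl⟩
      rw [hps, PySem.Chars.join_cons_cons, ← hps, ih]
      simp
    · rw [ih]; simp

-- character facts on the domain
theorem pvBlank_isspace (c : Char) (h : pvBlank c = true) : PySem.Chars.isspace c = true := by
  simp only [pvBlank, Bool.or_eq_true, beq_iff_eq] at h
  rcases h with (h | h) | h <;> subst h <;> decide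

theorem pvAscii_isspace (c : Char) (hd : pvDomChar c = true) (hnl : c ≠ '\n')
    (hs : PySem.Chars.isspace c = true) : pvBlank c = true := by
  have hnl' : c.toNat ≠ 10 := by
    intro hn; apply hnl; apply Char.ext
    have : ('\n').toNat = 10 := by decide
    unfold Char.toNat at hn this
    exact UInt32.toNat_inj.mp (by omega)
  simp only [pvDomChar, Bool.or_eq_true, Bool.and_eq_true, decide_eq_true_eq, beq_iff_eq] at hd
  simp only [PySem.Chars.isspace, Bool.or_eq_true, Bool.and_eq_true, decide_eq_true_eq] at hs
  have h9 : c.toNat = 32 ∨ c.toNat = 9 ∨ c.toNat = 13 := by omega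
  simp only [pvBlank, Bool.or_eq_true, beq_iff_eq]
  rcases h9 with h | h | h
  · left; left; apply Char.ext; unfold Char.toNat at h; have : (' ').toNat = 32 := by decide
    unfold Char.toNat at this; exact UInt32.toNat_inj.mp (by omega)
  · left; right; apply Char.ext; unfold Char.toNat at h; have : ('\t').toNat = 9 := by decide
    unfold Char.toNat at this; exact UInt32.toNat_inj.mp (by omega)
  · right; apply Char.ext; unfold Char.toNat at h; have : ('\r').toNat = 13 := by decide
    unfold Char.toNat at this; exact UInt32.toNat_inj.mp (by omega)

theorem pvStrip_eq_nil_iff (l : List Char) :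
    (PySem.Chars.strip l = []) ↔ ∀ c ∈ l, PySem.Chars.isspace c = true := by
  unfold PySem.Chars.strip PySem.Chars.rstrip PySem.Chars.lstrip
  constructor
  · intro h c hc
    rw [List.reverse_eq_nil_iff, List.dropWhile_eq_nil_iff] at h
    by_cases hsp : PySem.Chars.isspace c = true
    · exact hsp
    · exfalso
      have hcd : c ∈ List.dropWhile PySem.Chars.isspace l := by
        have := List.takeWhile_append_dropWhile (p := PySem.Chars.isspace) (l := l)
        rcases List.mem_append.mp (this ▸ hc) with h1 | h1
        · exact absurd (List.mem_takeWhile_imp h1) hsp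
        · exact h1
      exact hsp (h c (List.mem_reverse.mpr hcd))
  · intro h
    have : List.dropWhile PySem.Chars.isspace l = [] :=
      List.dropWhile_eq_nil_iff.mpr h
    rw [this]; rfl

theorem pvDropWhile_head (q : Char → Bool) (l : List Char) (d : Char) (r : List Char)
    (h : List.dropWhile q l = d :: r) : q d = false := by
  induction l with
  | nil => simp at h
  | cons c t ih =>
    rw [List.dropWhile_cons] at h
    by_cases hq : q c = true
    · rw [if_pos hq] at h; exact ih h
    · rw [if_neg hq] at h; cases h; simpa using hq

-- pvSkipIdx facts
theorem pvSkipIdx_ge (lines : List (List Char)) (i : Nat) (h : lines.length ≤ i) :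
    pvSkipIdx lines i = i := by
  rw [pvSkipIdx, dif_neg (by omega)]

theorem pvSkipIdx_shift (ls : List (List Char)) (l : List Char) (i : Nat) :
    pvSkipIdx (l :: ls) (i + 1) = pvSkipIdx ls i + 1 := by
  by_cases h : ls.length ≤ i
  · rw [pvSkipIdx_ge _ _ (by simpa using Nat.succ_le_succ h), pvSkipIdx_ge _ _ h]
  · conv_lhs => rw [pvSkipIdx]
    conv_rhs => rw [pvSkipIdx]
    have hg : (l :: ls).getD (i + 1) [] = ls.getD i [] := by simp
    by_cases hc : i < ls.length ∧ PySem.Chars.strip (ls.getD i []) = []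
    · rw [dif_pos ⟨by simpa using Nat.succ_lt_succ hc.1, by rw [hg]; exact hc.2⟩, dif_pos hc]
      exact pvSkipIdx_shift ls l (i + 1)
    · rw [dif_neg (by rw [hg]; intro hh; exact hc ⟨by omega, hh.2⟩), dif_neg hc]
termination_by ls.length - i

theorem pvSkipIdx_cons (l : List Char) (ls : List (List Char)) :
    pvSkipIdx (l :: ls) 0 =
      if PySem.Chars.strip l = [] then pvSkipIdx ls 0 + 1 else 0 := by
  rw [pvSkipIdx]
  split_ifs with h1 h2 h2
  · exact pvSkipIdx_shift ls l 0
  · exact absurd (by simpa using h1.2) h2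
  · exact absurd ⟨by simp, by simpa using h2⟩ h1
  · rfl

-- pvSkipBlankLines unfolding lemmas
theorem pvSkip_nil_drop (s : List Char) (h : s.dropWhile pvBlank = []) :
    pvSkipBlankLines s = s := by
  rw [pvSkipBlankLines, dif_neg (by rw [h]; decide)]

theorem pvSkip_newline (s rest : List Char) (h : s.dropWhile pvBlank = '\n' :: rest) :
    pvSkipBlankLines s = pvSkipBlankLines rest := by
  rw [pvSkipBlankLines, dif_pos (by rw [h]; rfl)]
  simp [h]

theorem pvSkip_other (s rest : List Char) (c : Char) (hc : c ≠ '\n')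
    (h : s.dropWhile pvBlank = c :: rest) : pvSkipBlankLines s = s := by
  rw [pvSkipBlankLines, dif_neg (by rw [h]; simpa using hc)]

-- startswith through takeWhile
theorem pvStartswith_takeWhile (q : Char → Bool) (p cs : List Char)
    (h : ∀ c ∈ p, q c = true) :
    PySem.Chars.startswith (cs.takeWhile q) p = PySem.Chars.startswith cs p := by
  unfold PySem.Chars.startswith
  induction p generalizing cs with
  | nil => simp
  | cons a p' ih =>
    have ha : q a = true := h a List.mem_cons_self
    cases cs with
    | nil => simp
    | cons c cs' =>
      rw [List.takeWhile_cons]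
      by_cases hq : q c = true
      · rw [if_pos hq]
        show (a == c && List.isPrefixOf p' (cs'.takeWhile q)) = (a == c && List.isPrefixOf p' cs')
        rw [ih cs' (fun x hx => h x (List.mem_cons_of_mem _ hx))]
      · rw [if_neg hq]
        have hac : (a == c) = false := by
          refine beq_eq_false_iff_ne.mpr ?_
          intro he; subst he; exact hq ha
        show (List.isPrefixOf (a :: p') []) = (a == c && List.isPrefixOf p' cs')
        simp [List.isPrefixOf, hac]

-- blank-prefix facts
theorem pvTakeBlank_no_nl (cs : List Char) : '\n' ∉ cs.takeWhile pvBlank := by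
  intro hm
  have := List.mem_takeWhile_imp hm
  exact absurd this (by decide)

theorem pvStrip_blank (l : List Char) (h : ∀ c ∈ l, pvBlank c = true) :
    PySem.Chars.strip l = [] :=
  (pvStrip_eq_nil_iff l).mpr (fun c hc => pvBlank_isspace c (h c hc))

-- from a domain hypothesis, a non-blank non-newline char is not whitespace
theorem pvStrip_ne_nil (l : List Char) (c : Char) (hc : c ∈ l)
    (hdc : pvDomChar c = true) (hnb : pvBlank c = false) (hnl : c ≠ '\n') :
    PySem.Chars.strip l ≠ [] := by
  intro h
  have := (pvStrip_eq_nil_iff l).mp h c hc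
  rw [pvAscii_isspace c hdc hnl this] at hnb
  exact absurd hnb (by decide)

-- head line of pvClean
theorem pvClean_head (cs : List Char) :
    ∃ L', pvClean cs [] = (cs.takeWhile (· != '\n')) :: L' := by
  have hno : '\n' ∉ cs.takeWhile (· != '\n') := by
    intro hm
    have := List.mem_takeWhile_imp hm
    simp at this
  cases hdq : cs.dropWhile (· != '\n') with
  | nil =>
    have hcs : cs.takeWhile (· != '\n') = cs := by
      have := List.takeWhile_append_dropWhile (p := (· != '\n')) (l := cs)
      rw [hdq] at this; simpa using this
    exact ⟨[], by rw [pvClean_no_nl0 cs (hcs ▸ hno), hcs]⟩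
  | cons d r =>
    have hd : d = '\n' := by
      have := pvDropWhile_head _ _ _ _ hdq
      simpa using this
    subst hd
    have hcs : cs.takeWhile (· != '\n') ++ '\n' :: r = cs := by
      have := List.takeWhile_append_dropWhile (p := (· != '\n')) (l := cs)
      rw [hdq] at this; exact this
    refine ⟨pvClean r [], ?_⟩
    conv_lhs => rw [← hcs]
    rw [pvClean_split0 _ _ hno]

-- decompose cs at its blank prefix
theorem pvBlank_decomp (cs : List Char) (x : List Char)
    (h : cs.dropWhile pvBlank = x) : cs = cs.takeWhile pvBlank ++ x :=
  (h ▸ List.takeWhile_append_dropWhile (p := pvBlank) (l := cs)).symm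

-- the first "\n"-line of cs through its blank prefix
theorem pvTakeWhile_q (cs : List Char) (c : Char) (rest : List Char)
    (hdw : cs.dropWhile pvBlank = c :: rest) (hc : c ≠ '\n') :
    cs.takeWhile (fun x => x != '\n') =
      cs.takeWhile pvBlank ++ c :: rest.takeWhile (fun x => x != '\n') := by
  have hcs := pvBlank_decomp cs _ hdw
  conv_lhs => rw [hcs]
  rw [List.takeWhile_append, List.takeWhile_eq_self_iff.mpr
    (fun x hx => by
      have hb := List.mem_takeWhile_imp hx
      have : x ≠ '\n' := fun he => absurd (he ▸ hb) (by decide)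
      simpa using this)]
  simp [hc]

-- all-blank strings: B's startswith test is false
theorem pvBlank_not_hash (cs : List Char) (h : ∀ c ∈ cs, pvBlank c = true) :
    PySem.Chars.startswith cs ['#', ' '] = false := by
  cases cs with
  | nil => rfl
  | cons c t =>
    have hc := h c List.mem_cons_self
    unfold PySem.Chars.startswith
    show (('#' == c) && List.isPrefixOf [' '] t) = false
    have : ('#' == c) = false := by
      refine beq_eq_false_iff_ne.mpr ?_
      intro he; subst he; exact absurd hc (by decide)
    simp [this]

-- ===== the three main lemmas =====

-- TAIL: A's "skip blank lines then join the rest" equals B's guarded suffix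
theorem pvTail (cs : List Char) (hd : cs.all pvDomChar = true) :
    PySem.Chars.join ['\n'] ((pvClean cs []).drop (pvSkipIdx (pvClean cs []) 0)) =
      (if (pvSkipBlankLines cs).dropWhile pvBlank = [] then [] else pvSkipBlankLines cs) := by
  cases hdw : cs.dropWhile pvBlank with
  | nil =>
    have hall : ∀ c ∈ cs, pvBlank c = true := List.dropWhile_eq_nil_iff.mp hdw
    have hno : '\n' ∉ cs := fun hm => absurd (hall _ hm) (by decide)
    rw [pvClean_no_nl0 cs hno]
    rw [pvSkipIdx_cons, if_pos (pvStrip_blank cs hall), pvSkipIdx_ge [] 0 (by simp)]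
    rw [pvSkip_nil_drop cs hdw, if_pos hdw]
    simp [PySem.Chars.join_nil]
  | cons c rest =>
    by_cases hc : c = '\n'
    · subst hc
      have hcs := pvBlank_decomp cs _ hdw
      have hrest : rest.all pvDomChar = true := by
        rw [hcs] at hd; simp only [List.all_append, List.all_cons, Bool.and_eq_true] at hd
        exact hd.2.2
      have hbl : ∀ x ∈ cs.takeWhile pvBlank, pvBlank x = true :=
        fun x hx => List.mem_takeWhile_imp hx
      conv_lhs => rw [hcs, pvClean_split0 _ _ (pvTakeBlank_no_nl cs)]
      rw [pvSkipIdx_cons,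
        if_pos (pvStrip_blank _ hbl), List.drop_succ_cons]
      rw [pvSkip_newline cs rest hdw]
      have hlen : rest.length < cs.length := by
        rw [hcs]; simp; omega
      exact pvTail rest hrest
    · rw [pvSkip_other cs rest c hc hdw, hdw]
      rw [if_neg (by simp)]
      obtain ⟨L', hL⟩ := pvClean_head cs
      have hcm : c ∈ cs := by
        have hcs := pvBlank_decomp cs _ hdw
        rw [hcs]; simp
      have hcd : pvDomChar c = true := by
        rw [List.all_eq_true] at hd; exact hd c hcm
      have hcnb : pvBlank c = false := pvDropWhile_head _ _ _ _ hdw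
      have hcmem : c ∈ cs.takeWhile (· != '\n') := by
        rw [pvTakeWhile_q cs c rest hdw hc]
        simp
      rw [hL, pvSkipIdx_cons,
        if_neg (pvStrip_ne_nil _ c hcmem hcd hcnb hc), List.drop_zero, ← hL,
        pvJoin_clean]
      rfl
termination_by cs.length
decreasing_by exact hlen

-- COND: A's "found an H1 line" test equals B's
theorem pvCond (cs : List Char) (hd : cs.all pvDomChar = true) :
    ((pvSkipIdx (pvClean cs []) 0 < (pvClean cs []).length) &&
      PySem.Chars.startswith ((pvClean cs []).getD (pvSkipIdx (pvClean cs []) 0) []) ['#', ' '])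
    = PySem.Chars.startswith (pvSkipBlankLines cs) ['#', ' '] := by
  cases hdw : cs.dropWhile pvBlank with
  | nil =>
    have hall : ∀ c ∈ cs, pvBlank c = true := List.dropWhile_eq_nil_iff.mp hdw
    have hno : '\n' ∉ cs := fun hm => absurd (hall _ hm) (by decide)
    rw [pvClean_no_nl0 cs hno]
    rw [pvSkipIdx_cons, if_pos (pvStrip_blank cs hall), pvSkipIdx_ge [] 0 (by simp)]
    rw [pvSkip_nil_drop cs hdw, pvBlank_not_hash cs hall]
    simp
  | cons c rest =>
    by_cases hc : c = '\n'
    · subst hc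
      have hcs := pvBlank_decomp cs _ hdw
      have hrest : rest.all pvDomChar = true := by
        rw [hcs] at hd; simp only [List.all_append, List.all_cons, Bool.and_eq_true] at hd
        exact hd.2.2
      have hbl : ∀ x ∈ cs.takeWhile pvBlank, pvBlank x = true :=
        fun x hx => List.mem_takeWhile_imp hx
      conv_lhs => rw [hcs, pvClean_split0 _ _ (pvTakeBlank_no_nl cs)]
      rw [pvSkipIdx_cons,
        if_pos (pvStrip_blank _ hbl)]
      simp only [List.length_cons, List.getD_cons_succ, Nat.add_lt_add_iff_right]
      rw [pvSkip_newline cs rest hdw]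
      have hlen : rest.length < cs.length := by
        rw [hcs]; simp; omega
      exact pvCond rest hrest
    · rw [pvSkip_other cs rest c hc hdw]
      obtain ⟨L', hL⟩ := pvClean_head cs
      have hcm : c ∈ cs := by
        have hcs := pvBlank_decomp cs _ hdw
        rw [hcs]; simp
      have hcd : pvDomChar c = true := by
        rw [List.all_eq_true] at hd; exact hd c hcm
      have hcnb : pvBlank c = false := pvDropWhile_head _ _ _ _ hdw
      have hcmem : c ∈ cs.takeWhile (· != '\n') := by
        rw [pvTakeWhile_q cs c rest hdw hc]
        simp
      rw [hL, pvSkipIdx_cons, if_neg (pvStrip_ne_nil _ c hcmem hcd hcnb hc)]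
      simp only [List.length_cons, List.getD_cons_zero]
      rw [pvStartswith_takeWhile (· != '\n') ['#', ' '] cs
        (by intro x hx; simp only [List.mem_cons, List.not_mem_nil, or_false] at hx
            rcases hx with h | h <;> subst h <;> rfl)]
      simp
termination_by cs.length
decreasing_by exact hlen

-- THEN: when the H1 test succeeds, A's joined tail equals B's guarded suffix
theorem pvThen (cs : List Char) (hd : cs.all pvDomChar = true)
    (hc : PySem.Chars.startswith (pvSkipBlankLines cs) ['#', ' '] = true) :
    PySem.Chars.join ['\n']
        ((pvClean cs []).drop (pvSkipIdx (pvClean cs []) (pvSkipIdx (pvClean cs []) 0 + 1)))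
      = pvThenB cs := by
  cases hdw : cs.dropWhile pvBlank with
  | nil =>
    have hall : ∀ c ∈ cs, pvBlank c = true := List.dropWhile_eq_nil_iff.mp hdw
    rw [pvSkip_nil_drop cs hdw, pvBlank_not_hash cs hall] at hc
    exact absurd hc (by decide)
  | cons c rest =>
    by_cases hcnl : c = '\n'
    · subst hcnl
      have hcs := pvBlank_decomp cs _ hdw
      have hrest : rest.all pvDomChar = true := by
        rw [hcs] at hd; simp only [List.all_append, List.all_cons, Bool.and_eq_true] at hd
        exact hd.2.2
      have hbl : ∀ x ∈ cs.takeWhile pvBlank, pvBlank x = true :=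
        fun x hx => List.mem_takeWhile_imp hx
      conv_lhs => rw [hcs, pvClean_split0 _ _ (pvTakeBlank_no_nl cs)]
      rw [pvSkipIdx_cons,
        if_pos (pvStrip_blank _ hbl), pvSkipIdx_shift, List.drop_succ_cons]
      have hskip := pvSkip_newline cs rest hdw
      rw [hskip] at hc
      have hthen : pvThenB cs = pvThenB rest := by unfold pvThenB; rw [hskip]
      rw [hthen]
      have hlen : rest.length < cs.length := by
        rw [hcs]; simp; omega
      exact pvThen rest hrest hc
    · have hskip := pvSkip_other cs rest c hcnl hdw
      rw [hskip] at hc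
      obtain ⟨L', hL⟩ := pvClean_head cs
      have hcm : c ∈ cs := by
        have hcs := pvBlank_decomp cs _ hdw
        rw [hcs]; simp
      have hcd : pvDomChar c = true := by
        rw [List.all_eq_true] at hd; exact hd c hcm
      have hcnb : pvBlank c = false := pvDropWhile_head _ _ _ _ hdw
      have hcmem : c ∈ cs.takeWhile (· != '\n') := by
        rw [pvTakeWhile_q cs c rest hdw hcnl]
        simp
      have hk0 : pvSkipIdx (pvClean cs []) 0 = 0 := by
        rw [hL, pvSkipIdx_cons, if_neg (pvStrip_ne_nil _ c hcmem hcd hcnb hcnl)]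
      rw [hk0]
      unfold pvThenB
      rw [hskip]
      cases hdq : cs.dropWhile (· != '\n') with
      | nil =>
        have hno : '\n' ∉ cs := by
          intro hm
          have hsplit := List.takeWhile_append_dropWhile (p := (· != '\n')) (l := cs)
          rw [hdq, List.append_nil] at hsplit
          have := List.mem_takeWhile_imp (hsplit ▸ hm)
          simp at this
        rw [pvClean_no_nl0 cs hno,
          pvSkipIdx_ge [cs] 1 (by simp), List.drop_succ_cons, List.drop_nil,
          PySem.Chars.join_nil]
      | cons d tl =>
        have hdnl : d = '\n' := by
          have := pvDropWhile_head _ _ _ _ hdq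
          simpa using this
        subst hdnl
        have hcs2 : cs.takeWhile (· != '\n') ++ '\n' :: tl = cs := by
          have := List.takeWhile_append_dropWhile (p := (· != '\n')) (l := cs)
          rw [hdq] at this; exact this
        have htl : tl.all pvDomChar = true := by
          rw [← hcs2] at hd
          simp only [List.all_append, List.all_cons, Bool.and_eq_true] at hd
          exact hd.2.2
        have hLtl : pvClean cs [] = (cs.takeWhile (· != '\n')) :: pvClean tl [] := by
          conv_lhs => rw [← hcs2]
          rw [pvClean_split0 _ _ (by
            intro hm
            have := List.mem_takeWhile_imp hm
            simp at this)]
        rw [hLtl, pvSkipIdx_shift, List.drop_succ_cons]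
        exact pvTail tl htl
termination_by cs.length
decreasing_by exact hlen

-- the two ports, rewritten into the common "if cond then … else content" shape
theorem pvA_shape (content : String) :
    remove_duplicate_h1 content =
      (if ((pvSkipIdx (pvClean content.toList []) 0 < (pvClean content.toList []).length) &&
            PySem.Chars.startswith
              ((pvClean content.toList []).getD (pvSkipIdx (pvClean content.toList []) 0) [])
              ['#', ' ']) = true then
        String.ofList (PySem.Chars.join ['\n']
          ((pvClean content.toList []).drop
            (pvSkipIdx (pvClean content.toList [])
              (pvSkipIdx (pvClean content.toList []) 0 + 1))))
      else content) := by
  unfold remove_duplicate_h1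
  rw [pvSplitOn_eq_clean]

theorem pvB_shape (content : String) :
    remove_duplicate_h1_alt content =
      (if PySem.Chars.startswith (pvSkipBlankLines content.toList) ['#', ' '] = true then
        String.ofList (pvThenB content.toList)
      else content) := by
  unfold remove_duplicate_h1_alt pvThenB
  by_cases hc : PySem.Chars.startswith (pvSkipBlankLines content.toList) ['#', ' '] = true
  · rw [if_pos hc, if_pos hc]
    cases hdq : (pvSkipBlankLines content.toList).dropWhile (· != '\n') with
    | nil => rfl
    | cons d tl =>
      simp only []
      split_ifs with h2
      · rfl
      · rfl
  · rw [if_neg hc, if_neg hc]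

-- ===== VERDICT (by name: the statement is the Claim_ definition above) =====
theorem remove_duplicate_h1_spec : Claim_equal_remove_duplicate_h1 := by
  intro content hdom
  unfold Spec_remove_duplicate_h1
  have hd : content.toList.all pvDomChar = true := hdom
  rw [pvA_shape, pvB_shape, pvCond content.toList hd]
  by_cases hc : PySem.Chars.startswith (pvSkipBlankLines content.toList) ['#', ' '] = true
  · rw [if_pos hc, if_pos hc, pvThen content.toList hd hc]
  · rw [if_neg hc, if_neg hc]
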